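-- pv_equiv track=rewrite | github.com/CyberKareem/kamehandle | kamehandle.py | add_numeric_suffixes
-- ===== SOURCE A (Python) =====
-- from typing import Dict, List, Set, Tuple, Optional
--
-- def add_numeric_suffixes(handles: List[str], add_numbers: Optional[Tuple[int, int]], max_len: Optional[int]) -> List[str]:
--     """
--     Add suffix numbers: handle1..handleN
--     """
--     if not add_numbers:
--         return handles
--
--     start, end = add_numbers
--     out: List[str] = []
--     seen: Set[str] = set()
--
--     # keep original first
--     for h in handles:
--         if h not in seen:
--             seen.add(h)
--             out.append(h)
--
--     for h in handles:
--         for n in range(start, end + 1):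
--             cand = f"{h}{n}"
--             if max_len and len(cand) > max_len:
--                 continue
--             if cand not in seen:
--                 seen.add(cand)
--                 out.append(cand)
--
--     return out
-- ===== SOURCE B (Python) =====
-- from typing import List, Tuple, Optional
--
--
-- def add_numeric_suffixes(handles: List[str], add_numbers: Optional[Tuple[int, int]], max_len: Optional[int]) -> List[str]:
--     """Declarative rebuild: one flat candidate comprehension, an optional length-filter
--     pass, then first-occurrence dedup by repeatedly deleting the head's later copies
--     (no seen set or dict)."""
--     if not add_numbers:
--         return handles
--
--     start, end = add_numbers
--     cands = [h + str(n) for h in handles for n in range(start, end + 1)]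
--     if max_len:
--         cands = [c for c in cands if len(c) <= max_len]
--
--     seq = handles + cands
--     out: List[str] = []
--     while seq:
--         head = seq[0]
--         out.append(head)
--         seq = [x for x in seq[1:] if x != head]
--     return out
-- ===== Notes on version B (the rewrite author's own statement) =====
-- stated objective: alternative
-- what changed: Replaces the interleaved generate-and-test loop with a seen set by a flat candidate comprehension, a separate optional length-filter pass, and a dedup that repeatedly emits the head and deletes its later copies from the remainder (no set/dict at all).
import Mathlib
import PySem

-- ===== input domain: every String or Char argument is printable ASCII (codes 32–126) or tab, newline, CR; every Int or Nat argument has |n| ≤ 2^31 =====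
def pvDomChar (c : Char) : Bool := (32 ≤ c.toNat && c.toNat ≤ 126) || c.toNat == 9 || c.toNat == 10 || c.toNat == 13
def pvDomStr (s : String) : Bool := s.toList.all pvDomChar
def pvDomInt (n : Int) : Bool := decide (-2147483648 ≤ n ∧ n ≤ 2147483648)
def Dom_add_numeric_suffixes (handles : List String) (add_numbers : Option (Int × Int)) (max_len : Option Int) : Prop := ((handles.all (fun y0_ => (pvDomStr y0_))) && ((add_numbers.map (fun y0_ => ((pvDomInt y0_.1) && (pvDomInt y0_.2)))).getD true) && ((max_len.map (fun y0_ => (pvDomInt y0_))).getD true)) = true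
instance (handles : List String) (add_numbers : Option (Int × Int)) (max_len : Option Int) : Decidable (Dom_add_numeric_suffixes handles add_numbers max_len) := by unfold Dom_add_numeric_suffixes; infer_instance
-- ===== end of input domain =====

-- B replaces A's interleaved generate-and-dedup loop (seen set) with a flat candidate
-- comprehension, a separate optional length-filter pass, and a subtractive dedup that
-- repeatedly emits the head and deletes its later copies (objective: alternative, no set/dict).

-- truthiness of `max_len and len(cand) > max_len`
def pvBad (max_len : Option Int) (cand : String) : Bool :=
  match max_len with
  | none => false
  | some m => (!(m == 0)) && decide (m < PySem.Str.len cand)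

-- ===== PORT A =====
def add_numeric_suffixes (handles : List String) (add_numbers : Option (Int × Int)) (max_len : Option Int) : List String :=
  match add_numbers with
  | none => handles
  | some (start, «end») =>
    -- keep original first
    let st0 : List String × PySem.Set String :=
      handles.foldl (fun acc h =>
        if !(PySem.Set.contains acc.2 h) then (acc.1 ++ [h], PySem.Set.add acc.2 h) else acc)
        ([], PySem.Set.empty)
    let st1 : List String × PySem.Set String :=
      handles.foldl (fun acc h =>
        (PySem.List.pyRange start («end» + 1) 1).foldl (fun acc2 n =>
          if pvBad max_len (h ++ PySem.Int.toStr n) then acc2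
          else if !(PySem.Set.contains acc2.2 (h ++ PySem.Int.toStr n)) then
            (acc2.1 ++ [h ++ PySem.Int.toStr n], PySem.Set.add acc2.2 (h ++ PySem.Int.toStr n))
          else acc2) acc) st0
    st1.1

-- ===== PORT B =====
-- the while-loop dedup: emit the head, delete its later copies, recurse on the remainder
def pvNub : List String → List String
  | [] => []
  | x :: xs => x :: pvNub (xs.filter (fun y => y != x))
termination_by l => l.length
decreasing_by simpa using Nat.lt_succ_of_le (List.length_filter_le _ _)

def add_numeric_suffixes_alt (handles : List String) (add_numbers : Option (Int × Int)) (max_len : Option Int) : List String :=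
  match add_numbers with
  | none => handles
  | some (start, «end») =>
    let cands : List String :=
      handles.flatMap (fun h =>
        (PySem.List.pyRange start («end» + 1) 1).map (fun n => h ++ PySem.Int.toStr n))
    let cands2 : List String :=
      match max_len with
      | none => cands
      | some m => if m == 0 then cands else cands.filter (fun c => decide (PySem.Str.len c ≤ m))
    pvNub (handles ++ cands2)

-- ===== PRECONDITION & SPEC =====
def Spec_add_numeric_suffixes (handles : List String) (add_numbers : Option (Int × Int)) (max_len : Option Int) (out : List String) : Prop := out = add_numeric_suffixes_alt handles add_numbers max_len
instance (handles : List String) (add_numbers : Option (Int × Int)) (max_len : Option Int) (out : List String) : Decidable (Spec_add_numeric_suffixes handles add_numbers max_len out) := by unfold Spec_add_numeric_suffixes; infer_instance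

-- ===== CLAIM (what is proved, stated in full; the proofs are below) =====
def Claim_equal_add_numeric_suffixes : Prop := ∀ (handles : List String) (add_numbers : Option (Int × Int)) (max_len : Option Int), Dom_add_numeric_suffixes handles add_numbers max_len → Spec_add_numeric_suffixes handles add_numbers max_len (add_numeric_suffixes handles add_numbers max_len)

-- ===== LEMMAS AND PROOFS =====

-- pvNub of the whole sequence = the Python-set fold (first occurrences in order)
theorem pv_nub_fold (xs : List String) : ∀ (acc : List String),
    xs.foldl PySem.Set.add acc = acc ++ pvNub (xs.filter (fun x => !(PySem.Set.contains acc x))) := by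
  induction xs with
  | nil => intro acc; simp [pvNub]
  | cons x xs ih =>
    intro acc
    by_cases hc : PySem.Set.contains acc x = true
    · have hmem : x ∈ acc := by simpa [PySem.Set.contains] using hc
      have hadd : PySem.Set.add acc x = acc := by simp [PySem.Set.add, PySem.Set.contains, hmem]
      simp only [List.foldl_cons, hadd, List.filter_cons, hc, Bool.not_true]
      simpa using ih acc
    · have hcf : PySem.Set.contains acc x = false := by simpa using hc
      have hmem : x ∉ acc := by simpa [PySem.Set.contains] using hc
      have hadd : PySem.Set.add acc x = acc ++ [x] := by simp [PySem.Set.add, PySem.Set.contains, hmem]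
      have hfilter : xs.filter (fun y => !(PySem.Set.contains (acc ++ [x]) y))
          = (xs.filter (fun y => !(PySem.Set.contains acc y))).filter (fun y => y != x) := by
        rw [List.filter_filter]
        refine List.filter_congr ?_
        intro y _
        simp [PySem.Set.contains, bne, beq_eq_decide, Bool.and_comm]
      simp only [List.foldl_cons, hadd, List.filter_cons, hcf, Bool.not_false, if_true]
      rw [ih (acc ++ [x]), hfilter, pvNub]
      simp
  
theorem pv_foldl_flatMap {α β γ : Type} (g : γ → List β) (f : α → β → α) (xs : List γ) :
    ∀ (a : α), (xs.flatMap g).foldl f a = xs.foldl (fun a x => (g x).foldl f a) a := by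
  induction xs with
  | nil => intro a; rfl
  | cons x xs ih => intro a; simp only [List.flatMap_cons, List.foldl_append, List.foldl_cons, ih]

-- A's first loop keeps out = seen; it computes the Set.add fold, twice
theorem pv_loop1 (hs : List String) : ∀ (l : List String),
    hs.foldl (fun acc h =>
        if !(PySem.Set.contains acc.2 h) then (acc.1 ++ [h], PySem.Set.add acc.2 h) else acc) (l, l)
      = (hs.foldl PySem.Set.add l, hs.foldl PySem.Set.add l) := by
  induction hs with
  | nil => intro l; rfl
  | cons h hs ih =>
    intro l
    by_cases hc : PySem.Set.contains l h = true
    · have hmem : h ∈ l := by simpa [PySem.Set.contains] using hc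
      have hadd : PySem.Set.add l h = l := by simp [PySem.Set.add, PySem.Set.contains, hmem]
      simp only [List.foldl_cons, hc, Bool.not_true, Bool.false_eq_true, if_false, hadd]
      exact ih l
    · have hcf : PySem.Set.contains l h = false := by simpa using hc
      have hmem : h ∉ l := by simpa [PySem.Set.contains] using hc
      have hadd : PySem.Set.add l h = l ++ [h] := by simp [PySem.Set.add, PySem.Set.contains, hmem]
      simp only [List.foldl_cons, hcf, Bool.not_false, if_true, hadd]
      exact ih (l ++ [h])

-- A's inner range loop likewise
theorem pv_loop_inner (bad : String → Bool) (c : Int → String) (ns : List Int) : ∀ (l : List String),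
    ns.foldl (fun acc2 n =>
        if bad (c n) then acc2
        else if !(PySem.Set.contains acc2.2 (c n)) then (acc2.1 ++ [c n], PySem.Set.add acc2.2 (c n))
        else acc2) (l, l)
      = (ns.foldl (fun t n => if bad (c n) then t else PySem.Set.add t (c n)) l,
         ns.foldl (fun t n => if bad (c n) then t else PySem.Set.add t (c n)) l) := by
  induction ns with
  | nil => intro l; rfl
  | cons n ns ih =>
    intro l
    by_cases hb : bad (c n) = true
    · simp only [List.foldl_cons, hb, if_true]; exact ih l
    · simp only [List.foldl_cons, hb, Bool.false_eq_true, if_false]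
      by_cases hc : PySem.Set.contains l (c n) = true
      · have hmem : c n ∈ l := by simpa [PySem.Set.contains] using hc
        have hadd : PySem.Set.add l (c n) = l := by simp [PySem.Set.add, PySem.Set.contains, hmem]
        simp only [hc, Bool.not_true, Bool.false_eq_true, if_false, hadd]
        exact ih l
      · have hcf : PySem.Set.contains l (c n) = false := by simpa using hc
        have hmem : c n ∉ l := by simpa [PySem.Set.contains] using hc
        have hadd : PySem.Set.add l (c n) = l ++ [c n] := by simp [PySem.Set.add, PySem.Set.contains, hmem]
        simp only [hcf, Bool.not_false, if_true, hadd]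
        exact ih (l ++ [c n])

-- A's outer loop over handles
theorem pv_loop2 (bad : String → Bool) (c : String → Int → String) (ns : List Int) (hs : List String) :
    ∀ (l : List String),
    hs.foldl (fun acc h =>
        ns.foldl (fun acc2 n =>
          if bad (c h n) then acc2
          else if !(PySem.Set.contains acc2.2 (c h n)) then (acc2.1 ++ [c h n], PySem.Set.add acc2.2 (c h n))
          else acc2) acc) (l, l)
      = (hs.foldl (fun t h => ns.foldl (fun t2 n => if bad (c h n) then t2 else PySem.Set.add t2 (c h n)) t) l,
         hs.foldl (fun t h => ns.foldl (fun t2 n => if bad (c h n) then t2 else PySem.Set.add t2 (c h n)) t) l) := by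
  induction hs with
  | nil => intro l; rfl
  | cons h hs ih =>
    intro l
    simp only [List.foldl_cons, pv_loop_inner bad (c h) ns l]
    exact ih _

-- both sides, for an arbitrary boolean length filter
theorem pv_main (handles : List String) (start e : Int) (bad : String → Bool) :
    (handles.foldl (fun acc h =>
        (PySem.List.pyRange start (e + 1) 1).foldl (fun acc2 n =>
          if bad (h ++ PySem.Int.toStr n) then acc2
          else if !(PySem.Set.contains acc2.2 (h ++ PySem.Int.toStr n)) then
            (acc2.1 ++ [h ++ PySem.Int.toStr n], PySem.Set.add acc2.2 (h ++ PySem.Int.toStr n))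
          else acc2) acc)
      (handles.foldl (fun acc h =>
        if !(PySem.Set.contains acc.2 h) then (acc.1 ++ [h], PySem.Set.add acc.2 h) else acc)
        ([], PySem.Set.empty))).1
    = pvNub (handles ++
        (handles.flatMap (fun h =>
          (PySem.List.pyRange start (e + 1) 1).map (fun n => h ++ PySem.Int.toStr n))).filter
          (fun cand => !(bad cand))) := by
  -- B side: pvNub = Set.add fold, then split the append and push the fold through filter/flatMap/map
  have hnub : ∀ (xs : List String), pvNub xs = xs.foldl PySem.Set.add [] := by
    intro xs
    have := pv_nub_fold xs []
    simpa [PySem.Set.contains, List.filter_true] using this.symm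
  rw [hnub, List.foldl_append, ← PySem.List.foldl_if_eq_foldl_filter, pv_foldl_flatMap]
  -- A side: the two loops are Set.add folds on a duplicated state
  have h0 := pv_loop1 handles []
  have h0' : (handles.foldl (fun acc h =>
        if !(PySem.Set.contains acc.2 h) then (acc.1 ++ [h], PySem.Set.add acc.2 h) else acc)
        (([] : List String), (PySem.Set.empty : PySem.Set String)))
      = (handles.foldl PySem.Set.add [], handles.foldl PySem.Set.add []) := h0
  rw [h0', pv_loop2 bad (fun h n => h ++ PySem.Int.toStr n) (PySem.List.pyRange start (e + 1) 1) handles]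
  -- align the two nested folds pointwise
  refine congrArg (fun F => handles.foldl F (handles.foldl PySem.Set.add [])) ?_
  funext t h
  rw [List.foldl_map]
  refine congrArg (fun G => (PySem.List.pyRange start (e + 1) 1).foldl G t) ?_
  funext t2 n
  cases bad (h ++ PySem.Int.toStr n) <;> simp

-- ===== VERDICT (by name: the statement is the Claim_ definition above) =====
theorem add_numeric_suffixes_spec : Claim_equal_add_numeric_suffixes := by
  intro handles add_numbers max_len _
  unfold Spec_add_numeric_suffixes add_numeric_suffixes add_numeric_suffixes_alt
  match add_numbers with
  | none => rfl
  | some (start, e) =>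
    simp only
    rw [pv_main handles start e (pvBad max_len)]
    congr 1
    match max_len with
    | none => simp [pvBad, List.filter_true]
    | some m =>
      by_cases hm : m == 0
      · simp [pvBad, hm, List.filter_true]
      · simp only [hm, Bool.false_eq_true, if_false]
        congr 1
        refine List.filter_congr ?_
        intro c _
        by_cases hlt : m < (c.length : Int)
        · simp [pvBad, hm, PySem.Str.len_eq, hlt, show ¬((c.length : Int) ≤ m) by omega]
        · simp [pvBad, hm, PySem.Str.len_eq, hlt, show (c.length : Int) ≤ m by omega]
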